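-- pv_equiv track=rewrite | github.com/AlexShkarin/pyLabLib | pylablib/legacy/aux_libs/file_formats/ecam.py | _gen_offsets
-- ===== SOURCE A (Python) =====
-- def _gen_offsets(fields):
--     offsets={}
--     off=0
--     for n,s in fields:
--         offsets[n]=off
--         off+=s
--     offsets["__end__"]=off
--     return offsets
-- ===== SOURCE B (Python) =====
-- def _gen_offsets(fields):
--     # Build the full prefix-sum offset table first, then map names onto it in one
--     # zip pass (instead of threading a running offset through the dict-building loop).
--     fs = list(fields)
--     offs = [0]
--     for _, s in fs:
--         offs.append(offs[-1] + s)
--     d = dict(zip((n for n, _ in fs), offs))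
--     d["__end__"] = offs[-1]
--     return d
-- ===== Notes on version B (the rewrite author's own statement) =====
-- stated objective: alternative
-- what changed: B materializes the whole prefix-sum offset table first and then builds the dict in a single zip pass, instead of threading a running offset and the dict through one loop.
import Mathlib
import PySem

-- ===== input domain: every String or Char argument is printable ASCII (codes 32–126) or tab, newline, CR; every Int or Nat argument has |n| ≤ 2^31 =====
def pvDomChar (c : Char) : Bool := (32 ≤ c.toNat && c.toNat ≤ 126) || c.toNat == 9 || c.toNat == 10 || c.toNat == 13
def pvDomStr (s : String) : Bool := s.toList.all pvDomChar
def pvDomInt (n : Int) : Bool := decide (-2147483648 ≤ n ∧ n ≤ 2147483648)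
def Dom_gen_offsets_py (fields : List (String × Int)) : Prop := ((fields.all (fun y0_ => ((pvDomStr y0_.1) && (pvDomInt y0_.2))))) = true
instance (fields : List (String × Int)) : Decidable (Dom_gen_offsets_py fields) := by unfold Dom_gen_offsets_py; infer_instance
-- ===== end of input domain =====

-- B builds the full prefix-sum offset table first, then fills the dict in one zip pass
-- (alternative decomposition; A threads a running offset and the dict through one loop).


-- ===== PORT A =====
def gen_offsets_py (fields : List (String × Int)) : List (String × Int) :=
  let st := fields.foldl
    (fun (p : PySem.Dict String Int × Int) ns => (p.1.insert ns.1 p.2, p.2 + ns.2))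
    (PySem.Dict.empty, 0)
  (st.1.insert "__end__" st.2).items

-- ===== PORT B =====
def gen_offsets_py_alt (fields : List (String × Int)) : List (String × Int) :=
  let fs := fields
  let offs := fs.foldl (fun a ns => a ++ [PySem.List.pyGetD a (-1) 0 + ns.2]) [0]
  let d := PySem.Dict.ofList ((fs.map Prod.fst).zip offs)
  (d.insert "__end__" (PySem.List.pyGetD offs (-1) 0)).items

-- ===== PRECONDITION & SPEC =====
def Spec_gen_offsets_py (fields : List (String × Int)) (out : List (String × Int)) : Prop := out = gen_offsets_py_alt fields
instance (fields : List (String × Int)) (out : List (String × Int)) : Decidable (Spec_gen_offsets_py fields out) := by unfold Spec_gen_offsets_py; infer_instance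

-- ===== CLAIM (what is proved, stated in full; the proofs are below) =====
def Claim_equal_gen_offsets_py : Prop := ∀ (fields : List (String × Int)), Dom_gen_offsets_py fields → Spec_gen_offsets_py fields (gen_offsets_py fields)

-- ===== LEMMAS AND PROOFS =====

-- the prefix-sum tail starting after `off` over the sizes of `fs`
def pvPref (off : Int) : List (String × Int) → List Int
  | [] => []
  | ns :: t => (off + ns.2) :: pvPref (off + ns.2) t

-- B's offset-building loop appends exactly the prefix-sum tail
lemma pvBuildOffs (fs : List (String × Int)) : ∀ (acc : List Int) (off : Int),
    acc.getLast? = some off →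
    fs.foldl (fun a ns => a ++ [PySem.List.pyGetD a (-1) 0 + ns.2]) acc = acc ++ pvPref off fs := by
  induction fs with
  | nil => intro acc off _; simp [pvPref]
  | cons ns t ih =>
    intro acc off h
    have hne : acc ≠ [] := by intro e; simp [e] at h
    have hlast : PySem.List.pyGetD acc (-1) 0 = off := by
      rw [PySem.List.pyGetD_neg_one acc 0 hne]
      have := List.getLast?_eq_some_getLast hne
      rw [this] at h; exact Option.some.inj h
    simp only [List.foldl_cons, hlast]
    rw [ih (acc ++ [off + ns.2]) (off + ns.2) (by simp)]
    simp [pvPref, List.append_assoc]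

lemma pvPrefLast (fs : List (String × Int)) : ∀ (off : Int),
    (off :: pvPref off fs).getLast? = some (off + (fs.map Prod.snd).sum) := by
  induction fs with
  | nil => intro off; simp [pvPref]
  | cons ns t ih =>
    intro off
    simp only [pvPref, List.getLast?_cons_cons]
    rw [ih (off + ns.2)]
    simp only [List.map_cons, List.sum_cons]
    rw [add_assoc]

-- A's combined loop equals the fold of inserts over names zipped with the prefix table
lemma pvMain (fs : List (String × Int)) : ∀ (d : PySem.Dict String Int) (off : Int),
    fs.foldl (fun (p : PySem.Dict String Int × Int) ns => (p.1.insert ns.1 p.2, p.2 + ns.2)) (d, off)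
    = (((fs.map Prod.fst).zip (off :: pvPref off fs)).foldl (fun d p => d.insert p.1 p.2) d,
       off + (fs.map Prod.snd).sum) := by
  induction fs with
  | nil => intro d off; simp
  | cons ns t ih =>
    intro d off
    simp only [List.foldl_cons, List.map_cons, pvPref, List.zip_cons_cons]
    rw [ih (d.insert ns.1 off) (off + ns.2)]
    simp only [List.sum_cons]
    rw [add_assoc]

-- ===== VERDICT (by name: the statement is the Claim_ definition above) =====
theorem gen_offsets_py_spec : Claim_equal_gen_offsets_py := by
  intro fields _
  unfold Spec_gen_offsets_py gen_offsets_py gen_offsets_py_alt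
  have hoffs := pvBuildOffs fields [0] 0 (by simp)
  simp only [hoffs, List.singleton_append]
  have hlast : PySem.List.pyGetD (0 :: pvPref 0 fields) (-1) 0 = 0 + (fields.map Prod.snd).sum := by
    rw [PySem.List.pyGetD_neg_one (0 :: pvPref 0 fields) 0 (by simp)]
    have h := pvPrefLast fields 0
    have h2 := List.getLast?_eq_some_getLast (l := 0 :: pvPref 0 fields) (by simp)
    rw [h2] at h; exact Option.some.inj h
  rw [hlast, pvMain fields PySem.Dict.empty 0]
  rfl
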